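-- pv_equiv track=rewrite | github.com/liupengsay/PyIsTheBestLang | src/basis/brute_force/problem.py | lc_1878
-- ===== SOURCE A (Python) =====
-- from functools import reduce, lru_cache
-- from typing import List
--
-- def lc_1878(grid: List[List[int]]) -> List[int]:
--     """
--     url: https://leetcode.cn/problems/get-biggest-three-rhombus-sums-in-a-grid/
--     tag: prefix_sum|brute_force
--     """
--     m, n = len(grid), len(grid[0])
--
--     @lru_cache(None)
--     def left_up(p, q):
--
--         if p < 0 or q < 0:
--             return 0
--         res = grid[p][q]
--         if p and q:
--             res += left_up(p - 1, q - 1)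
--
--         return res
--
--     @lru_cache(None)
--     def right_up(p, q):
--         if p < 0 or q < 0:
--             return 0
--         res = grid[p][q]
--         if p and q + 1 < n:
--             res += right_up(p - 1, q + 1)
--
--         return res
--
--     ans = set()
--     k = max(m, n)
--     for i in range(m):
--         for j in range(n):
--             ans.add(grid[i][j])
--
--             for x in range(1, k + 1):
--                 up_point = [i - x, j]
--                 down_point = [i + x, j]
--                 left_point = [i, j - x]
--                 right_point = [i, j + x]
--                 if not all(0 <= a < m and 0 <= b < n for a, b in [up_point, down_point, left_point, right_point]):
--                     break
--                 cur = left_up(right_point[0], right_point[1]) - left_up(up_point[0], up_point[1])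
--                 cur += left_up(down_point[0], down_point[1]) - left_up(left_point[0], left_point[1])
--
--                 cur += right_up(left_point[0], left_point[1]) - right_up(up_point[0], up_point[1])
--                 cur += right_up(down_point[0], down_point[1]) - right_up(right_point[0], right_point[1])
--                 cur -= grid[down_point[0]][down_point[1]]
--                 cur += grid[up_point[0]][up_point[1]]
--                 ans.add(cur)
--     ans = list(ans)
--     ans.sort(reverse=True)
--     return ans[:3]
-- ===== SOURCE B (Python) =====
-- from typing import List
--
-- def lc_1878(grid: List[List[int]]) -> List[int]:
--     m, n = len(grid), len(grid[0])
--     sums = set()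
--     for i in range(m):
--         for j in range(n):
--             sums.add(grid[i][j])
--             for x in range(1, max(m, n) + 1):
--                 if not (0 <= i - x and i + x < m and 0 <= j - x and j + x < n):
--                     break
--                 s = 0
--                 for t in range(x):
--                     s += grid[i - x + t][j + t]      # top vertex -> just before right
--                     s += grid[i + t][j + x - t]      # right vertex -> just before bottom
--                     s += grid[i + x - t][j - t]      # bottom vertex -> just before left
--                     s += grid[i - t][j - x + t]      # left vertex -> just before top
--                 sums.add(s)
--     return sorted(sums, reverse=True)[:3]
-- ===== Notes on version B (the rewrite author's own statement) =====
-- stated objective: simpler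
-- what changed: B drops A's two lru_cache-memoized diagonal prefix-sum tables and the inclusion-exclusion formula, and instead sums each rhombus border directly by walking its four diagonal edges (each vertex counted once); same cell/radius enumeration, same break condition, same candidate set, sorted descending, top 3.
import Mathlib
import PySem

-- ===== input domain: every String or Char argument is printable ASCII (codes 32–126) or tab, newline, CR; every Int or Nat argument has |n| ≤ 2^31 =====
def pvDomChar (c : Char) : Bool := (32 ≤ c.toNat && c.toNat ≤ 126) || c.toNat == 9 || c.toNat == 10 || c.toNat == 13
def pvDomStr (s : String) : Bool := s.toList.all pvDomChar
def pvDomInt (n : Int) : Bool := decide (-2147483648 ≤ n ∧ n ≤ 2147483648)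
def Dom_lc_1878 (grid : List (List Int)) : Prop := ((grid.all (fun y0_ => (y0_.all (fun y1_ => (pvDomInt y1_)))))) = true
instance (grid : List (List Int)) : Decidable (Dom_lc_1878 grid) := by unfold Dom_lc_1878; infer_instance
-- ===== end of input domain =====

-- B replaces A's two memoized diagonal prefix-sum tables by a direct walk of the four
-- rhombus edges (simpler: no caches, no inclusion–exclusion), same candidate set and output.

-- ===== PORT A =====

-- grid[p][q]; every use admitted by Pre_ has 0 ≤ p < len(grid), 0 ≤ q ≤ the row's length
-- (Python raises on the inputs Pre_ excludes, so the .getD 0 default is never the value used)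
def pvGridAt (grid : List (List Int)) (p q : Int) : Int :=
  (PySem.List.pyGet? ((PySem.List.pyGet? grid p).getD []) q).getD 0

-- left_up(p, q) of A (lru_cache only memoizes; the computed value is this recursion)
def pvLeftUp (grid : List (List Int)) (p q : Int) : Int :=
  if _h : p < 0 ∨ q < 0 then 0
  else
    pvGridAt grid p q + (if _h2 : p ≠ 0 ∧ q ≠ 0 then pvLeftUp grid (p - 1) (q - 1) else 0)
termination_by p.toNat
decreasing_by omega

-- right_up(p, q) of A
def pvRightUp (grid : List (List Int)) (n : Int) (p q : Int) : Int :=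
  if _h : p < 0 ∨ q < 0 then 0
  else
    pvGridAt grid p q + (if _h2 : p ≠ 0 ∧ q + 1 < n then pvRightUp grid n (p - 1) (q + 1) else 0)
termination_by p.toNat
decreasing_by omega

-- the value A adds for the rhombus centred at (i, j) with radius x (A's `cur`)
def pvCurA (grid : List (List Int)) (n i j x : Int) : Int :=
  pvLeftUp grid i (j + x) - pvLeftUp grid (i - x) j
    + (pvLeftUp grid (i + x) j - pvLeftUp grid i (j - x))
    + (pvRightUp grid n i (j - x) - pvRightUp grid n (i - x) j)
    + (pvRightUp grid n (i + x) j - pvRightUp grid n i (j + x))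
    - pvGridAt grid (i + x) j + pvGridAt grid (i - x) j

-- A's inner `for x in range(1, k+1): … break` loop; rem = number of radii left to try
def pvRadiusA (grid : List (List Int)) (m n i j : Int) :
    Nat → Int → PySem.Set Int → PySem.Set Int
  | 0, _, ans => ans
  | rem + 1, x, ans =>
    if (0 ≤ i - x ∧ i - x < m ∧ 0 ≤ j ∧ j < n) ∧ (0 ≤ i + x ∧ i + x < m ∧ 0 ≤ j ∧ j < n) ∧
        (0 ≤ i ∧ i < m ∧ 0 ≤ j - x ∧ j - x < n) ∧ (0 ≤ i ∧ i < m ∧ 0 ≤ j + x ∧ j + x < n) then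
      pvRadiusA grid m n i j rem (x + 1) (PySem.Set.add ans (pvCurA grid n i j x))
    else ans

def lc_1878 (grid : List (List Int)) : List Int :=
  let m : Int := grid.length
  let n : Int := ((PySem.List.pyGet? grid 0).getD []).length  -- len(grid[0]); IndexError on [] is excluded by Pre_
  let k : Int := max m n
  let ans : PySem.Set Int :=
    (PySem.List.pyRange 0 m).foldl (fun ans i =>
      (PySem.List.pyRange 0 n).foldl (fun ans j =>
        pvRadiusA grid m n i j k.toNat 1 (PySem.Set.add ans (pvGridAt grid i j))) ans)
      PySem.Set.empty
  (PySem.List.sorted ans (fun v => v) true).take 3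

-- ===== PORT B =====

-- B's inner `for t in range(x)` loop: sum of the four diagonal edges, each vertex counted once
def pvEdgeSum (grid : List (List Int)) (i j x : Int) : Int :=
  (PySem.List.pyRange 0 x).foldl (fun s t =>
    s + pvGridAt grid (i - x + t) (j + t) + pvGridAt grid (i + t) (j + x - t)
      + pvGridAt grid (i + x - t) (j - t) + pvGridAt grid (i - t) (j - x + t)) 0

-- B's `for x in range(1, max(m,n)+1): … break` loop
def pvRadiusB (grid : List (List Int)) (m n i j : Int) :
    Nat → Int → PySem.Set Int → PySem.Set Int
  | 0, _, ans => ans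
  | rem + 1, x, ans =>
    if 0 ≤ i - x ∧ i + x < m ∧ 0 ≤ j - x ∧ j + x < n then
      pvRadiusB grid m n i j rem (x + 1) (PySem.Set.add ans (pvEdgeSum grid i j x))
    else ans

def lc_1878_alt (grid : List (List Int)) : List Int :=
  let m : Int := grid.length
  let n : Int := ((PySem.List.pyGet? grid 0).getD []).length  -- len(grid[0])
  let k : Int := max m n
  let sums : PySem.Set Int :=
    (PySem.List.pyRange 0 m).foldl (fun sums i =>
      (PySem.List.pyRange 0 n).foldl (fun sums j =>
        pvRadiusB grid m n i j k.toNat 1 (PySem.Set.add sums (pvGridAt grid i j))) sums)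
      PySem.Set.empty
  (PySem.List.sorted sums (fun v => v) true).take 3

-- ===== PRECONDITION & SPEC =====

-- Pre_ excludes exactly the inputs where Python A raises: the empty grid (len(grid[0]) is an
-- IndexError) and grids with a row shorter than the first row (grid[i][j] raises for some j < n).
def Pre_lc_1878 (grid : List (List Int)) : Prop :=
  grid ≠ [] ∧ ∀ row ∈ grid, (grid.headD []).length ≤ row.length
instance (grid : List (List Int)) : Decidable (Pre_lc_1878 grid) := by
  unfold Pre_lc_1878; infer_instance

def pvWitness_lc_1878 : List (List Int) := [[1, 2], [3, 4]]

def Spec_lc_1878 (grid : List (List Int)) (out : List Int) : Prop := out = lc_1878_alt grid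
instance (grid : List (List Int)) (out : List Int) : Decidable (Spec_lc_1878 grid out) := by
  unfold Spec_lc_1878; infer_instance

-- ===== CLAIM (what is proved, stated in full; the proofs are below) =====
def Claim_equal_lc_1878 : Prop :=
  ∀ (grid : List (List Int)), Dom_lc_1878 grid → Pre_lc_1878 grid →
    Spec_lc_1878 grid (lc_1878 grid)

-- ===== LEMMAS AND PROOFS =====

-- bridge: a mapped List.range sum is a Finset.range sum
lemma pv_sum_list_range (n : Nat) (f : Nat → Int) :
    (List.map f (List.range n)).sum = ∑ t ∈ Finset.range n, f t := by
  induction n with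
  | zero => simp
  | succ k ih => rw [Finset.sum_range_succ, List.range_succ]; simp [ih]

-- reindex a Finset.range sum back to front
lemma pv_sum_reindex (n : Nat) (f h : Nat → Int) (he : ∀ t < n, f (n - 1 - t) = h t) :
    ∑ t ∈ Finset.range n, f t = ∑ t ∈ Finset.range n, h t := by
  rw [← Finset.sum_range_reflect]
  exact Finset.sum_congr rfl (fun t ht => he t (Finset.mem_range.mp ht))

-- telescoping left_up along its recursion: X steps down the ↘ diagonal
lemma pv_lu_tele (grid : List (List Int)) :
    ∀ (X : Nat) (p q : Int), (X : Int) ≤ p → (X : Int) ≤ q →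
      pvLeftUp grid p q =
        pvLeftUp grid (p - X) (q - X) +
          ∑ t ∈ Finset.range X, pvGridAt grid (p - t) (q - t) := by
  intro X
  induction X with
  | zero => intro p q _ _; simp
  | succ Y ih =>
    intro p q hp hq
    rw [pvLeftUp, dif_neg (by omega), dif_pos (by omega)]
    rw [ih (p - 1) (q - 1) (by omega) (by omega)]
    rw [Finset.sum_range_succ']
    have e : ∀ t : Nat, pvGridAt grid (p - 1 - t) (q - 1 - t)
        = pvGridAt grid (p - (t + 1 : Nat)) (q - (t + 1 : Nat)) := by
      intro t; congr 1 <;> push_cast <;> ring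
    simp only [e]
    push_cast
    ring_nf

-- telescoping right_up along its recursion: X steps down the ↙ diagonal (read upwards)
lemma pv_ru_tele (grid : List (List Int)) (n : Int) :
    ∀ (X : Nat) (p q : Int), (X : Int) ≤ p → 0 ≤ q → q + X < n →
      pvRightUp grid n p q =
        pvRightUp grid n (p - X) (q + X) +
          ∑ t ∈ Finset.range X, pvGridAt grid (p - t) (q + t) := by
  intro X
  induction X with
  | zero => intro p q _ _ _; simp
  | succ Y ih =>
    intro p q hp hq0 hq
    rw [pvRightUp, dif_neg (by omega), dif_pos (by omega)]
    rw [ih (p - 1) (q + 1) (by omega) (by omega) (by omega)]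
    rw [Finset.sum_range_succ']
    have e : ∀ t : Nat, pvGridAt grid (p - 1 - t) (q + 1 + t)
        = pvGridAt grid (p - (t + 1 : Nat)) (q + (t + 1 : Nat)) := by
      intro t; congr 1 <;> push_cast <;> ring
    simp only [e]
    push_cast
    ring_nf

-- B's edge walk as a Finset sum
lemma pv_edge_sum_eq (grid : List (List Int)) (i j : Int) (X : Nat) :
    pvEdgeSum grid i j X =
      ∑ t ∈ Finset.range X,
        (pvGridAt grid (i - X + t) (j + t) + pvGridAt grid (i + t) (j + X - t)
          + pvGridAt grid (i + X - t) (j - t) + pvGridAt grid (i - t) (j - X + t)) := by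
  unfold pvEdgeSum
  rw [PySem.List.pyRange_zero_natCast, List.foldl_map]
  rw [PySem.List.foldl_congr_mem _ _
    (fun s (t : Nat) =>
      s + (pvGridAt grid (i - X + t) (j + t) + pvGridAt grid (i + t) (j + X - t)
        + pvGridAt grid (i + X - t) (j - t) + pvGridAt grid (i - t) (j - X + t))) _
    (by intro acc t _; ring)]
  rw [PySem.List.foldl_add, pv_sum_list_range]
  ring

-- the heart of the equivalence: A's inclusion–exclusion value = B's edge-walk value
lemma pv_cur_eq (grid : List (List Int)) (n i j x : Int)
    (hx : 1 ≤ x) (hiu : 0 ≤ i - x) (hjl : 0 ≤ j - x) (hjr : j + x < n) :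
    pvCurA grid n i j x = pvEdgeSum grid i j x := by
  obtain ⟨X, rfl⟩ : ∃ X : Nat, (X : Int) = x := ⟨x.toNat, by omega⟩
  rw [pv_edge_sum_eq]
  unfold pvCurA
  rw [pv_lu_tele grid X i (j + X) (by omega) (by omega),
      pv_lu_tele grid X (i + X) j (by omega) (by omega),
      pv_ru_tele grid n X i (j - X) (by omega) (by omega) (by omega),
      pv_ru_tele grid n X (i + X) j (by omega) (by omega) (by omega)]
  simp only [add_sub_cancel_right, sub_add_cancel, add_sub_cancel_left]
  -- shift identity for the diagonal through the top and right vertices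
  have hre1 : ∑ t ∈ Finset.range X, pvGridAt grid (i - t) (j + X - t)
      = ∑ t ∈ Finset.range X, pvGridAt grid (i - X + (t + 1 : Nat)) (j + (t + 1 : Nat)) :=
    pv_sum_reindex X _ _ (by intro t ht; congr 1 <;> omega)
  have h1a := Finset.sum_range_succ (fun t : Nat => pvGridAt grid (i - X + t) (j + t)) X
  have h1b := Finset.sum_range_succ' (fun t : Nat => pvGridAt grid (i - X + t) (j + t)) X
  -- shift identity for the diagonal through the right and bottom vertices
  have hre2 : ∑ t ∈ Finset.range X, pvGridAt grid (i + X - t) (j + t)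
      = ∑ t ∈ Finset.range X, pvGridAt grid (i + (t + 1 : Nat)) (j + X - (t + 1 : Nat)) :=
    pv_sum_reindex X _ _ (by intro t ht; congr 1 <;> omega)
  have h2a := Finset.sum_range_succ (fun t : Nat => pvGridAt grid (i + t) (j + X - t)) X
  have h2b := Finset.sum_range_succ' (fun t : Nat => pvGridAt grid (i + t) (j + X - t)) X
  simp only [Nat.cast_zero, Nat.cast_add, Nat.cast_one, add_zero, sub_zero, sub_add_cancel,
    add_sub_cancel_right] at h1a h1b h2a h2b hre1 hre2
  rw [Finset.sum_add_distrib, Finset.sum_add_distrib, Finset.sum_add_distrib]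
  linarith [h1a, h1b, h2a, h2b, hre1, hre2]

-- the two radius loops agree for any in-range centre
lemma pv_radius_eq (grid : List (List Int)) (m n i j : Int)
    (hi : 0 ≤ i) (him : i < m) (hj : 0 ≤ j) (hjn : j < n) :
    ∀ (rem : Nat) (x : Int), 1 ≤ x → ∀ ans,
      pvRadiusA grid m n i j rem x ans = pvRadiusB grid m n i j rem x ans := by
  intro rem
  induction rem with
  | zero => intro x _ ans; rfl
  | succ r ih =>
    intro x hx ans
    by_cases hc : 0 ≤ i - x ∧ i + x < m ∧ 0 ≤ j - x ∧ j + x < n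
    · rw [pvRadiusA, pvRadiusB, if_pos (by omega :
          (0 ≤ i - x ∧ i - x < m ∧ 0 ≤ j ∧ j < n) ∧ (0 ≤ i + x ∧ i + x < m ∧ 0 ≤ j ∧ j < n) ∧
          (0 ≤ i ∧ i < m ∧ 0 ≤ j - x ∧ j - x < n) ∧ (0 ≤ i ∧ i < m ∧ 0 ≤ j + x ∧ j + x < n)),
        if_pos hc, pv_cur_eq grid n i j x hx (by omega) (by omega) (by omega)]
      exact ih (x + 1) (by omega) _
    · rw [pvRadiusA, pvRadiusB, if_neg (by omega), if_neg hc]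

lemma pv_main_eq (grid : List (List Int)) : lc_1878 grid = lc_1878_alt grid := by
  unfold lc_1878 lc_1878_alt
  refine congrArg (fun s : PySem.Set Int => (PySem.List.sorted s (fun v : Int => v) true).take 3) ?_
  apply PySem.List.foldl_congr_mem
  intro acc i hi
  apply PySem.List.foldl_congr_mem
  intro acc2 j hj
  rw [PySem.List.mem_pyRange_one] at hi hj
  exact pv_radius_eq grid _ _ i j hi.1 hi.2 hj.1 hj.2 _ 1 le_rfl _

-- ===== VERDICT (by name: the statement is the Claim_ definition above) =====
theorem lc_1878_spec : Claim_equal_lc_1878 := by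
  intro grid _ _
  unfold Spec_lc_1878
  exact pv_main_eq grid
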